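-- pv_equiv track=rewrite | github.com/sjhyun7057/Algorithm | 프로그래머스/lv1/17681. ［1차］ 비밀지도/［1차］ 비밀지도.py | solution
-- ===== SOURCE A (Python) =====
-- def solution(n, arr1, arr2):
--     def change_bin_num(n, arr):
--         idx = 0
--         bin_n = n
--         for num in arr:
--             new_num = ''
--             while bin_n > 0:
--                 bin_n -= 1
--                 if num//(2**bin_n):
--                     num = num%(2**bin_n)
--                     new_num += '1'
--                 else:
--                     new_num += '0'
--             arr[idx] = new_num
--             idx += 1
--             bin_n = n
--         return arr
--
--     arr1, arr2 = change_bin_num(n,arr1), change_bin_num(n, arr2)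
--
--     shop_list = []
--     for bin1, bin2 in zip(arr1, arr2):
--         shop = ''
--         for b1, b2 in zip(bin1, bin2):
--             if int(b1) or int(b2):
--                 shop += '#'
--             else:
--                 shop += ' '
--         shop_list.append(shop)
--     return shop_list
-- ===== SOURCE B (Python) =====
-- def solution(n, arr1, arr2):
--     rows = []
--     for a, b in zip(arr1, arr2):
--         row = []
--         for k in range(n - 1, -1, -1):
--             p = 1 << k
--             da, db = a // p, b // p
--             if da:
--                 a %= p
--             if db:
--                 b %= p
--             row.append('#' if da or db else ' ')
--         rows.append(''.join(row))
--     return rows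
-- ===== Notes on version B (the rewrite author's own statement) =====
-- stated objective: faster
-- what changed: B is one fused pass: for each pair it walks the bit positions n-1..0 once, keeping two integer remainders and emitting '#'/' ' directly, instead of A's two array-rebuilding passes that overwrite arr1/arr2 with hand-built binary strings and a third zip pass that re-parses each digit character with int(); B does not mutate arr1/arr2 (A rebinds every element in place), so the equivalence is about the return value only.
import Mathlib
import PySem

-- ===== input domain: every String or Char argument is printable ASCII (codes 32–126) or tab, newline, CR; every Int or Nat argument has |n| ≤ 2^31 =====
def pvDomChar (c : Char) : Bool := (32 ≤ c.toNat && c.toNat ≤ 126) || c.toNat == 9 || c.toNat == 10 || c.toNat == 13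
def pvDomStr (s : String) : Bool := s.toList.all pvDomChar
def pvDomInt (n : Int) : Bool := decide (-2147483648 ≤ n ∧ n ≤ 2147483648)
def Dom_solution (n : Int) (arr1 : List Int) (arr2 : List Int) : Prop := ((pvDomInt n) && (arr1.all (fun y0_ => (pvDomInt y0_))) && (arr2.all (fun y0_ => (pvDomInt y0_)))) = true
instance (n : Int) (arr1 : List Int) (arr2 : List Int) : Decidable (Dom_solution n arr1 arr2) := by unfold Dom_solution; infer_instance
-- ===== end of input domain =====

-- B fuses the work into one pass per row (two integer remainders, emit '#'/' ' directly) where A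
-- rebuilds both arrays as binary strings and then compares digit characters; A also mutates
-- arr1/arr2 in place, B does not, so the equivalence proved here is about the RETURN value only.

-- ===== PORT A =====
-- the while-loop of change_bin_num: while bin_n > 0: bin_n -= 1; test num // 2**bin_n, …
-- (inside the loop bin_n ≥ 0 after the decrement, so Python's 2**bin_n is 2 ^ bin_n.toNat exactly)
def pvBinLoop (binn : Int) (num : Int) (acc : String) : String :=
  if _h : binn > 0 then
    let b := binn - 1
    if PySem.Int.floordiv num (2 ^ b.toNat) ≠ 0 then
      pvBinLoop b (PySem.Int.mod num (2 ^ b.toNat)) (acc.push '1')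
    else
      pvBinLoop b num (acc.push '0')
  else acc
termination_by binn.toNat
decreasing_by all_goals omega

-- change_bin_num: each element of arr is replaced in place by its rendered string
def pvChangeBinNum (n : Int) (arr : List Int) : List String :=
  arr.map (fun num => pvBinLoop n num "")

def solution (n : Int) (arr1 : List Int) (arr2 : List Int) : List String :=
  (List.zip (pvChangeBinNum n arr1) (pvChangeBinNum n arr2)).map (fun p =>
    String.ofList ((List.zip p.1.toList p.2.toList).map (fun q =>
      -- int(b1) or int(b2): the digit characters are always '0'/'1' here, so int() never raises
      if (PySem.Int.ofStr? (String.ofList [q.1])).getD 0 ≠ 0 ∨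
         (PySem.Int.ofStr? (String.ofList [q.2])).getD 0 ≠ 0 then '#' else ' ')))

-- ===== PORT B =====
-- the inner for-loop of Source B over range(n-1, -1, -1), carrying the two remainders a, b and the row
-- (every k produced by this range is ≥ 0, so Python's 1 << k is 1 <<< k.toNat exactly)
def pvRowLoop : List Int → Int → Int → List Char → List Char
  | [], _, _, row => row
  | k :: ks, a, b, row =>
      let p : Int := (1 : Int) <<< k.toNat
      let da := PySem.Int.floordiv a p
      let db := PySem.Int.floordiv b p
      pvRowLoop ks (if da ≠ 0 then PySem.Int.mod a p else a)
                   (if db ≠ 0 then PySem.Int.mod b p else b)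
                   (row ++ [if da ≠ 0 ∨ db ≠ 0 then '#' else ' '])

def solution_alt (n : Int) (arr1 : List Int) (arr2 : List Int) : List String :=
  (List.zip arr1 arr2).map (fun pr =>
    String.ofList (pvRowLoop (PySem.List.pyRange (n - 1) (-1) (-1)) pr.1 pr.2 []))

-- ===== PRECONDITION & SPEC =====
def Spec_solution (n : Int) (arr1 : List Int) (arr2 : List Int) (out : List String) : Prop := out = solution_alt n arr1 arr2
instance (n : Int) (arr1 : List Int) (arr2 : List Int) (out : List String) : Decidable (Spec_solution n arr1 arr2 out) := by unfold Spec_solution; infer_instance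

-- ===== CLAIM (what is proved, stated in full; the proofs are below) =====
def Claim_equal_solution : Prop := ∀ (n : Int) (arr1 : List Int) (arr2 : List Int), Dom_solution n arr1 arr2 → Spec_solution n arr1 arr2 (solution n arr1 arr2)

-- ===== LEMMAS AND PROOFS =====

-- the digit list A's while-loop produces for one number at width k (proof-side characterisation)
def pvDigs : Nat → Int → List Char
  | 0, _ => []
  | k + 1, x =>
      if PySem.Int.floordiv x (2 ^ k) ≠ 0 then '1' :: pvDigs k (PySem.Int.mod x (2 ^ k))
      else '0' :: pvDigs k x

theorem pvBinLoop_neg (binn num : Int) (acc : String) (h : ¬ binn > 0) :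
    pvBinLoop binn num acc = acc := by
  rw [pvBinLoop, dif_neg h]

theorem pvBinLoop_toList (k : Nat) : ∀ (x : Int) (acc : String),
    (pvBinLoop (k : Int) x acc).toList = acc.toList ++ pvDigs k x := by
  induction k with
  | zero =>
    intro x acc
    rw [pvBinLoop_neg _ _ _ (by omega)]
    simp [pvDigs]
  | succ k ih =>
    intro x acc
    rw [pvBinLoop, dif_pos (by positivity : ((k + 1 : Nat) : Int) > 0)]
    have hb : (((k + 1 : Nat) : Int) - 1).toNat = k := by omega
    have hb' : (((k + 1 : Nat) : Int) - 1) = (k : Int) := by push_cast; ring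
    simp only [hb', Int.toNat_natCast]
    rw [pvDigs]
    by_cases hd : PySem.Int.floordiv x (2 ^ k) ≠ 0
    · rw [if_pos hd, if_pos hd, ih]
      simp
    · rw [if_neg hd, if_neg hd, ih]
      simp

theorem pvDigs_mem (k : Nat) : ∀ (x : Int) (c : Char), c ∈ pvDigs k x → c = '1' ∨ c = '0' := by
  induction k with
  | zero => intro x c hc; simp [pvDigs] at hc
  | succ k ih =>
    intro x c hc
    rw [pvDigs] at hc
    by_cases hd : PySem.Int.floordiv x (2 ^ k) ≠ 0
    · rw [if_pos hd, List.mem_cons] at hc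
      rcases hc with h | h
      · exact Or.inl h
      · exact ih _ _ h
    · rw [if_neg hd, List.mem_cons] at hc
      rcases hc with h | h
      · exact Or.inr h
      · exact ih _ _ h

theorem pvRowLoop_digs (k : Nat) : ∀ (a b : Int) (row : List Char),
    pvRowLoop (PySem.List.pyRange ((k : Int) - 1) (-1) (-1)) a b row =
      row ++ (List.zip (pvDigs k a) (pvDigs k b)).map
        (fun q => if q.1 = '1' ∨ q.2 = '1' then '#' else ' ') := by
  induction k with
  | zero =>
    intro a b row
    rw [PySem.List.pyRange_neg_one_eq_nil (by omega)]
    simp [pvRowLoop, pvDigs]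
  | succ k ih =>
    intro a b row
    have hcons : PySem.List.pyRange (((k + 1 : Nat) : Int) - 1) (-1) (-1) =
        (((k + 1 : Nat) : Int) - 1) :: PySem.List.pyRange ((((k + 1 : Nat) : Int) - 1) - 1) (-1) (-1) :=
      PySem.List.pyRange_neg_one_cons (by omega)
    have hk1 : (((k + 1 : Nat) : Int) - 1) = (k : Int) := by push_cast; ring
    rw [hcons, hk1, pvRowLoop]
    have hp : ((1 : Int) <<< ((k : Int)).toNat) = (2 : Int) ^ k := by
      rw [Int.toNat_natCast, Int.shiftLeft_eq]; ring
    simp only [hp]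
    rw [ih, pvDigs, pvDigs]
    split_ifs <;> simp_all [List.append_assoc]

theorem pvMaster (n : Int) (arr1 arr2 : List Int) :
    solution n arr1 arr2 = solution_alt n arr1 arr2 := by
  unfold solution solution_alt pvChangeBinNum
  rw [List.zip_map, List.map_map]
  refine List.map_congr_left ?_
  rintro ⟨x, y⟩ -
  simp only [Function.comp_apply, Prod.map_fst, Prod.map_snd]
  by_cases hn : n ≤ 0
  · rw [pvBinLoop_neg n x "" (by omega), pvBinLoop_neg n y "" (by omega),
      PySem.List.pyRange_neg_one_eq_nil (by omega)]
    rfl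
  · obtain ⟨k, hk⟩ : ∃ k : Nat, n = (k : Int) := ⟨n.toNat, by omega⟩
    subst hk
    rw [pvRowLoop_digs k x y []]
    congr 1
    rw [List.nil_append, pvBinLoop_toList k x "", pvBinLoop_toList k y ""]
    simp only [String.toList_empty, List.nil_append]
    refine List.map_congr_left ?_
    intro q hq
    obtain ⟨h1, h2⟩ := List.of_mem_zip hq
    have e1 : (PySem.Int.ofStr? (String.ofList ['1'])).getD 0 = 1 := by decide
    have e0 : (PySem.Int.ofStr? (String.ofList ['0'])).getD 0 = 0 := by decide
    rcases pvDigs_mem k x q.1 h1 with hc1 | hc1 <;>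
      rcases pvDigs_mem k y q.2 h2 with hc2 | hc2 <;>
        simp [hc1, hc2, e1, e0]

-- ===== VERDICT (by name: the statement is the Claim_ definition above) =====
theorem solution_spec : Claim_equal_solution := by
  intro n arr1 arr2 _
  exact pvMaster n arr1 arr2
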